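-- pv_equiv track=rewrite | github.com/Solders-Girdles/GPT-Trader | scripts/testing/selective_runner.py | determine_tests_for_changed_modules
-- ===== SOURCE A (Python) =====
-- from collections.abc import Iterable
--
-- def determine_tests_for_changed_modules(
--     changed: Iterable[str],
--     module_to_tests: dict[str, set[str]],
--     dependency_report: dict[str, object],
-- ) -> set[str]:
--     raw_graph = dependency_report.get("graph", {})
--     graph: dict[str, list[str]] = {
--         module: list(neighbors) for module, neighbors in raw_graph.items()
--     }
--
--     # Build reverse graph to find dependents (modules that import changed modules)
--     reverse: dict[str, set[str]] = {node: set() for node in graph}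
--     for src, targets in graph.items():
--         for dest in targets:
--             reverse.setdefault(dest, set()).add(src)
--
--     impacted_modules: set[str] = set()
--
--     def collect_dependents(module: str) -> None:
--         if module in impacted_modules:
--             return
--         impacted_modules.add(module)
--         for parent in reverse.get(module, set()):
--             collect_dependents(parent)
--
--     for changed_module in changed:
--         if changed_module in module_to_tests:
--             collect_dependents(changed_module)
--
--     affected_tests: set[str] = set()
--     for module in impacted_modules:
--         affected_tests.update(module_to_tests.get(module, set()))
--     return affected_tests
-- ===== SOURCE B (Python) =====
-- def determine_tests_for_changed_modules(changed, module_to_tests, dependency_report):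
--     graph_items = list(dependency_report.get("graph", {}).items())
--
--     # Explicit worklist DFS; dependents of a module are found by scanning the
--     # forward edge list on demand instead of materialising a reverse adjacency map.
--     impacted = set()
--     worklist = [m for m in changed if m in module_to_tests]
--     while worklist:
--         module = worklist.pop(0)
--         if module in impacted:
--             continue
--         impacted.add(module)
--         worklist = [src for src, targets in graph_items if module in targets] + worklist
--
--     tests = set()
--     for module in impacted:
--         for t in module_to_tests.get(module, ()):
--             tests.add(t)
--     return tests
-- ===== Notes on version B (the rewrite author's own statement) =====
-- stated objective: alternative
-- what changed: B drops the precomputed reverse dependency map and the recursive collect_dependents entirely: an explicit worklist traversal discovers the dependents of each visited module by scanning the forward edge list on demand, then unions the tests of the impacted modules.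
import Mathlib
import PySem

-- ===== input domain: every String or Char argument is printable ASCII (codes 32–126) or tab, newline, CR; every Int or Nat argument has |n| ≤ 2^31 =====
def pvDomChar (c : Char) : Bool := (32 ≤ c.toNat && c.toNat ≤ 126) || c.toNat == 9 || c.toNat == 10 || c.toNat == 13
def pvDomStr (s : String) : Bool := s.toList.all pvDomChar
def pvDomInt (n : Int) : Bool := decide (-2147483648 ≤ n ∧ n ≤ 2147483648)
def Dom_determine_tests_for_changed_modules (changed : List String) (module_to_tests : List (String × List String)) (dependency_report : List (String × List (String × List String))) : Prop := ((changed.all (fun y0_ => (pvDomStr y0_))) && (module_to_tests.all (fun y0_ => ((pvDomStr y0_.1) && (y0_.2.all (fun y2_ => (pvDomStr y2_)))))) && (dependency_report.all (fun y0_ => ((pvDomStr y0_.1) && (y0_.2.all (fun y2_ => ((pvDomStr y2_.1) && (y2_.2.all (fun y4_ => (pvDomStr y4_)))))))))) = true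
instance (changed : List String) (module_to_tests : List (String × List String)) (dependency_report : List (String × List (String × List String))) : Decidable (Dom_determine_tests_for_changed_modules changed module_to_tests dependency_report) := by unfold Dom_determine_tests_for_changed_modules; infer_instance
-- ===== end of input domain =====

-- B drops A's precomputed reverse dependency map and recursive DFS: an explicit worklist
-- traversal finds dependents by scanning the forward edge list on demand (alternative, not faster).

-- ===== PORT A =====
-- reverse-graph construction ({node: set() for node in graph}; setdefault(dest).add(src))
def pvReverse (dependency_report : List (String × List (String × List String))) : PySem.Dict String (PySem.Set String) :=
  let raw_graph := (PySem.Dict.mk dependency_report).getD "graph" []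
  let graph := raw_graph.foldl (fun d p => PySem.Dict.insert d p.1 p.2) (PySem.Dict.mk [])
  let rev0 := (PySem.Dict.keys graph).foldl (fun d node => PySem.Dict.insert d node PySem.Set.empty) (PySem.Dict.mk [])
  (PySem.Dict.items graph).foldl
    (fun d p => p.2.foldl (fun d dest => PySem.Dict.modify d dest PySem.Set.empty (fun s => PySem.Set.add s p.1)) d) rev0

-- totality guard for A's recursion: one unit of fuel per first visit of a module;
-- every visited module is among `changed` or the reverse graph's value sets
def pvFuel (changed : List String) (rev : PySem.Dict String (PySem.Set String)) : Nat :=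
  (changed ++ (PySem.Dict.values rev).flatten).length + 1

-- A's recursive collect_dependents (fuel only guards the recursion; it decreases on first visits)
def pvCollectA (rev : PySem.Dict String (PySem.Set String)) : Nat → PySem.Set String → String → PySem.Set String
  | fuel, impacted, module =>
    if PySem.Set.contains impacted module then impacted
    else
      match fuel with
      | 0 => impacted
      | fuel' + 1 =>
        (PySem.Dict.getD rev module PySem.Set.empty).foldl
          (fun imp parent => pvCollectA rev fuel' imp parent) (PySem.Set.add impacted module)

def determine_tests_for_changed_modules (changed : List String) (module_to_tests : List (String × List String)) (dependency_report : List (String × List (String × List String))) : List String :=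
  let rev := pvReverse dependency_report
  let mttd := PySem.Dict.mk module_to_tests
  let impacted := changed.foldl
    (fun imp c => if PySem.Dict.contains mttd c then pvCollectA rev (pvFuel changed rev) imp c else imp)
    PySem.Set.empty
  impacted.foldl (fun tests m => PySem.Set.update tests (PySem.Dict.getD mttd m [])) PySem.Set.empty

-- ===== PORT B =====
-- dependents of m, read off the forward edge list: [src for src, targets in graph_items if m in targets]
def pvParents (graph_items : List (String × List String)) (m : String) : List String :=
  (graph_items.filter (fun p => p.2.contains m)).map Prod.fst

-- B's while-loop over the worklist (parents function abstracted; fuel = one unit per first visit)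
def pvLoopB (pi : String → List String) : Nat → List String → PySem.Set String → PySem.Set String
  | _, [], impacted => impacted
  | fuel, module :: rest, impacted =>
    if PySem.Set.contains impacted module then pvLoopB pi fuel rest impacted
    else
      match fuel with
      | 0 => impacted
      | fuel' + 1 => pvLoopB pi fuel' (pi module ++ rest) (PySem.Set.add impacted module)
termination_by fuel agenda _ => (fuel, agenda.length)

def determine_tests_for_changed_modules_alt (changed : List String) (module_to_tests : List (String × List String)) (dependency_report : List (String × List (String × List String))) : List String :=
  let graph_items := PySem.Dict.items
    (((PySem.Dict.mk dependency_report).getD "graph" []).foldl (fun d p => PySem.Dict.insert d p.1 p.2) PySem.Dict.empty)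
  let mttd := PySem.Dict.mk module_to_tests
  let impacted := pvLoopB (pvParents graph_items) (changed.length + graph_items.length + 1)
    (changed.filter (fun c => PySem.Dict.contains mttd c)) PySem.Set.empty
  impacted.foldl (fun tests m => (PySem.Dict.getD mttd m []).foldl (fun t x => PySem.Set.add t x) tests) PySem.Set.empty

-- ===== PRECONDITION & SPEC =====
def Spec_determine_tests_for_changed_modules (changed : List String) (module_to_tests : List (String × List String)) (dependency_report : List (String × List (String × List String))) (out : List String) : Prop := out = determine_tests_for_changed_modules_alt changed module_to_tests dependency_report
instance (changed : List String) (module_to_tests : List (String × List String)) (dependency_report : List (String × List (String × List String))) (out : List String) : Decidable (Spec_determine_tests_for_changed_modules changed module_to_tests dependency_report out) := by unfold Spec_determine_tests_for_changed_modules; infer_instance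

-- ===== CLAIM (what is proved, stated in full; the proofs are below) =====
def Claim_equal_determine_tests_for_changed_modules : Prop := ∀ (changed : List String) (module_to_tests : List (String × List String)) (dependency_report : List (String × List (String × List String))), Dom_determine_tests_for_changed_modules changed module_to_tests dependency_report → Spec_determine_tests_for_changed_modules changed module_to_tests dependency_report (determine_tests_for_changed_modules changed module_to_tests dependency_report)

-- ===== LEMMAS AND PROOFS =====

-- number of universe modules not yet visited: the measure both traversals consume fuel against
def pvFree (U : List String) (imp : PySem.Set String) : Nat :=
  (U.filter (fun x => !PySem.Set.contains imp x)).length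

theorem pvFree_cons (u : String) (U : List String) (imp : PySem.Set String) :
    pvFree (u :: U) imp = (if u ∈ imp then 0 else 1) + pvFree U imp := by
  by_cases h : u ∈ imp <;> simp [pvFree, h] <;> omega

theorem pvFree_append_le (U : List String) (imp t : PySem.Set String) :
    pvFree U (imp ++ t) ≤ pvFree U imp := by
  induction U with
  | nil => simp [pvFree]
  | cons u U ih =>
    rw [pvFree_cons, pvFree_cons]
    by_cases h : u ∈ imp ++ t <;> by_cases h2 : u ∈ imp <;>
      simp only [h, h2, if_true, if_false] <;> first
        | omega
        | (exact absurd (List.mem_append_left t h2) h)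

theorem pvFree_pos (U : List String) (imp : PySem.Set String) (m : String)
    (hm : m ∈ U) (h : m ∉ imp) : 0 < pvFree U imp := by
  have : m ∈ U.filter (fun x => !PySem.Set.contains imp x) :=
    List.mem_filter.2 ⟨hm, by simp [h]⟩
  exact List.length_pos_of_mem this

theorem pvFree_add_lt (U : List String) (imp : PySem.Set String) (m : String)
    (hm : m ∈ U) (h : m ∉ imp) :
    pvFree U (imp ++ [m]) < pvFree U imp := by
  induction U with
  | nil => simp at hm
  | cons u U ih =>
    rw [pvFree_cons, pvFree_cons]
    rcases List.mem_cons.1 hm with rfl | hm'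
    · have h1 : m ∈ imp ++ [m] := List.mem_append_right _ (List.mem_singleton.2 rfl)
      simp only [h1, h, if_true, if_false]
      have := pvFree_append_le U imp [m]
      omega
    · have htail := ih hm'
      by_cases hu : u ∈ imp
      · have : u ∈ imp ++ [m] := List.mem_append_left _ hu
        simp only [hu, this, if_true]; omega
      · by_cases hu2 : u ∈ imp ++ [m] <;> simp only [hu, hu2, if_true, if_false] <;> omega

theorem pvAdd_eq_append (imp : PySem.Set String) (m : String)
    (h : m ∉ imp) : PySem.Set.add imp m = imp ++ [m] := by
  simp [PySem.Set.add, h]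

-- every output of either traversal step extends its input set on the right
theorem pvFoldl_ext {α : Type} (g : PySem.Set String → α → PySem.Set String)
    (H : ∀ acc x, ∃ t, g acc x = acc ++ t) :
    ∀ (l : List α) (acc : PySem.Set String), ∃ t, l.foldl g acc = acc ++ t := by
  intro l
  induction l with
  | nil => intro acc; exact ⟨[], by simp⟩
  | cons x l ih =>
    intro acc
    obtain ⟨t1, h1⟩ := H acc x
    obtain ⟨t2, h2⟩ := ih (g acc x)
    exact ⟨t1 ++ t2, by rw [List.foldl_cons, h2, h1, List.append_assoc]⟩

theorem pvCollectA_ext (rev : PySem.Dict String (PySem.Set String)) :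
    ∀ (f : Nat) (imp : PySem.Set String) (m : String),
      ∃ t, pvCollectA rev f imp m = imp ++ t := by
  intro f
  induction f with
  | zero =>
    intro imp m
    rw [pvCollectA.eq_def]
    dsimp only
    by_cases h : m ∈ imp <;> simp [h]
  | succ f ih =>
    intro imp m
    rw [pvCollectA.eq_def]
    dsimp only
    by_cases h : m ∈ imp
    · simp [h]
    · obtain ⟨t, ht⟩ := pvFoldl_ext (fun acc p => pvCollectA rev f acc p) (fun acc p => ih acc p)
        (PySem.Dict.getD rev m PySem.Set.empty) (PySem.Set.add imp m)
      refine ⟨[m] ++ t, ?_⟩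
      simp only [PySem.Set.contains]
      rw [if_neg (by simpa using h)]
      rw [ht, pvAdd_eq_append imp m h, List.append_assoc]

-- fuel irrelevance for A's recursion: any fuel ≥ the number of unvisited universe modules
theorem pvCollectA_irrel (rev : PySem.Dict String (PySem.Set String)) (U : List String)
    (HU : ∀ m p, p ∈ PySem.Dict.getD rev m PySem.Set.empty → p ∈ U) :
    ∀ (n f₁ f₂ : Nat) (imp : PySem.Set String) (m : String),
      m ∈ U → pvFree U imp ≤ n → n ≤ f₁ → n ≤ f₂ →
      pvCollectA rev f₁ imp m = pvCollectA rev f₂ imp m := by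
  intro n
  induction n using Nat.strong_induction_on with
  | _ n SIH =>
  intro f₁ f₂ imp m hm hfree h1 h2
  by_cases hc : m ∈ imp
  · rw [pvCollectA.eq_def, pvCollectA.eq_def]; simp [hc]
  · have hpos : 0 < pvFree U imp := pvFree_pos U imp m hm hc
    cases f₁ with
    | zero => omega
    | succ g₁ =>
      cases f₂ with
      | zero => omega
      | succ g₂ =>
        rw [pvCollectA.eq_def, pvCollectA.eq_def]
        dsimp only
        simp only [PySem.Set.contains]
        rw [if_neg (by simpa using hc), if_neg (by simpa using hc)]
        have hstart : pvFree U (PySem.Set.add imp m) ≤ n - 1 := by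
          rw [pvAdd_eq_append imp m hc]
          have := pvFree_add_lt U imp m hm hc; omega
        have inner : ∀ (ps : List String), (∀ p ∈ ps, p ∈ U) →
            ∀ acc, pvFree U acc ≤ n - 1 →
            ps.foldl (fun a p => pvCollectA rev g₁ a p) acc
              = ps.foldl (fun a p => pvCollectA rev g₂ a p) acc := by
          intro ps
          induction ps with
          | nil => intro _ acc _; rfl
          | cons p ps ih =>
            intro hps acc hacc
            have hstep : pvCollectA rev g₁ acc p = pvCollectA rev g₂ acc p :=
              SIH (n-1) (by omega) g₁ g₂ acc p (hps p List.mem_cons_self) hacc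
                (by omega) (by omega)
            rw [List.foldl_cons, List.foldl_cons, hstep]
            obtain ⟨t, ht⟩ := pvCollectA_ext rev g₂ acc p
            refine ih (fun q hq => hps q (List.mem_cons_of_mem _ hq)) _ ?_
            rw [ht]; exact le_trans (pvFree_append_le U acc t) hacc
        exact inner _ (fun p hp => HU m p hp) _ hstart

theorem pvFoldA_irrel (rev : PySem.Dict String (PySem.Set String)) (U : List String)
    (HU : ∀ m p, p ∈ PySem.Dict.getD rev m PySem.Set.empty → p ∈ U) :
    ∀ (ps : List String) (n f₁ f₂ : Nat) (imp : PySem.Set String),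
      (∀ p ∈ ps, p ∈ U) → pvFree U imp ≤ n → n ≤ f₁ → n ≤ f₂ →
      ps.foldl (fun acc p => pvCollectA rev f₁ acc p) imp
        = ps.foldl (fun acc p => pvCollectA rev f₂ acc p) imp := by
  intro ps
  induction ps with
  | nil => intro _ _ _ _ _ _ _ _; rfl
  | cons p ps ih =>
    intro n f₁ f₂ imp hps hfree h1 h2
    have hstep : pvCollectA rev f₁ imp p = pvCollectA rev f₂ imp p :=
      pvCollectA_irrel rev U HU n f₁ f₂ imp p (hps p List.mem_cons_self) hfree h1 h2
    rw [List.foldl_cons, List.foldl_cons, hstep]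
    obtain ⟨t, ht⟩ := pvCollectA_ext rev f₂ imp p
    refine ih n f₁ f₂ _ (fun q hq => hps q (List.mem_cons_of_mem _ hq)) ?_ h1 h2
    rw [ht]; exact le_trans (pvFree_append_le U imp t) hfree

theorem pvLoopB_irrel (pi : String → List String) (U : List String)
    (HU : ∀ m p, p ∈ pi m → p ∈ U) :
    ∀ (n f₁ f₂ : Nat) (xs : List String) (imp : PySem.Set String),
      (∀ x ∈ xs, x ∈ U) → pvFree U imp ≤ n → n ≤ f₁ → n ≤ f₂ →
      pvLoopB pi f₁ xs imp = pvLoopB pi f₂ xs imp := by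
  intro n
  induction n using Nat.strong_induction_on with
  | _ n SIH =>
  intro f₁ f₂ xs
  induction xs with
  | nil => intro imp _ _ _ _; rw [pvLoopB.eq_def, pvLoopB.eq_def]
  | cons m rest ih =>
    intro imp hxs hfree h1 h2
    by_cases hc : m ∈ imp
    · rw [pvLoopB.eq_def, pvLoopB.eq_def]
      simp only [PySem.Set.contains]
      rw [if_pos (by simpa using hc), if_pos (by simpa using hc)]
      exact ih imp (fun x hx => hxs x (List.mem_cons_of_mem _ hx)) hfree h1 h2
    · have hpos : 0 < pvFree U imp :=
        pvFree_pos U imp m (hxs m List.mem_cons_self) hc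
      cases f₁ with
      | zero => omega
      | succ g₁ =>
        cases f₂ with
        | zero => omega
        | succ g₂ =>
          rw [pvLoopB.eq_def, pvLoopB.eq_def]
          dsimp only
          simp only [PySem.Set.contains]
          rw [if_neg (by simpa using hc), if_neg (by simpa using hc)]
          have hm : m ∈ U := hxs m List.mem_cons_self
          have hstart : pvFree U (PySem.Set.add imp m) ≤ n - 1 := by
            rw [pvAdd_eq_append imp m hc]
            have := pvFree_add_lt U imp m hm hc; omega
          exact SIH (n-1) (by omega) g₁ g₂ (pi m ++ rest)
            (PySem.Set.add imp m)
            (by intro x hx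
                rcases List.mem_append.1 hx with hx' | hx'
                · exact HU m x hx'
                · exact hxs x (List.mem_cons_of_mem _ hx'))
            hstart (by omega) (by omega)

-- the bridge: running the worklist on xs ++ ys equals folding A's recursion over xs first
theorem pvBridge (rev : PySem.Dict String (PySem.Set String)) (U : List String)
    (HU : ∀ m p, p ∈ PySem.Dict.getD rev m PySem.Set.empty → p ∈ U) :
    ∀ (n f : Nat) (xs ys : List String) (imp : PySem.Set String),
      (∀ x ∈ xs, x ∈ U) → (∀ y ∈ ys, y ∈ U) → pvFree U imp ≤ n → n ≤ f →
      pvLoopB (fun m => PySem.Dict.getD rev m PySem.Set.empty) f (xs ++ ys) imp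
        = pvLoopB (fun m => PySem.Dict.getD rev m PySem.Set.empty) f ys
            (xs.foldl (fun acc c => pvCollectA rev f acc c) imp) := by
  intro n
  induction n using Nat.strong_induction_on with
  | _ n SIH =>
  intro f xs
  induction xs with
  | nil => intro ys imp _ _ _ _; rfl
  | cons m xs' ih =>
    intro ys imp hxs hys hfree hf
    by_cases hc : m ∈ imp
    · rw [List.cons_append, pvLoopB.eq_def]
      simp only [PySem.Set.contains]
      rw [if_pos (by simpa using hc)]
      have hA : pvCollectA rev f imp m = imp := by
        rw [pvCollectA.eq_def]
        dsimp only
        simp only [PySem.Set.contains]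
        rw [if_pos (by simpa using hc)]
      rw [List.foldl_cons, hA]
      exact ih ys imp (fun x hx => hxs x (List.mem_cons_of_mem _ hx)) hys hfree hf
    · have hm : m ∈ U := hxs m List.mem_cons_self
      have hpos : 0 < pvFree U imp := pvFree_pos U imp m hm hc
      cases f with
      | zero => omega
      | succ g =>
        have hstart : pvFree U (PySem.Set.add imp m) ≤ n - 1 := by
          rw [pvAdd_eq_append imp m hc]
          have := pvFree_add_lt U imp m hm hc; omega
        have hpsU : ∀ p ∈ PySem.Dict.getD rev m PySem.Set.empty, p ∈ U := fun p hp => HU m p hp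
        -- unfold one worklist step
        rw [List.cons_append, pvLoopB.eq_def]
        dsimp only
        simp only [PySem.Set.contains]
        rw [if_neg (by simpa using hc)]
        -- one step of A's recursion on the right
        have hA : pvCollectA rev (g+1) imp m
            = (PySem.Dict.getD rev m PySem.Set.empty).foldl
                (fun a p => pvCollectA rev g a p) (PySem.Set.add imp m) := by
          rw [pvCollectA.eq_def]
          dsimp only
          simp only [PySem.Set.contains]
          rw [if_neg (by simpa using hc)]
        rw [List.foldl_cons, hA]
        have hsub : ∀ x ∈ PySem.Dict.getD rev m PySem.Set.empty ++ xs', x ∈ U := by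
          intro x hx
          rcases List.mem_append.1 hx with hx' | hx'
          · exact hpsU x hx'
          · exact hxs x (List.mem_cons_of_mem _ hx')
        have hSIH := SIH (n-1) (by omega) g (PySem.Dict.getD rev m PySem.Set.empty ++ xs') ys
          (PySem.Set.add imp m) hsub hys hstart (by omega)
        rw [← List.append_assoc, hSIH, List.foldl_append]
        set ps := PySem.Dict.getD rev m PySem.Set.empty with hps
        set X := ps.foldl (fun a p => pvCollectA rev g a p) (PySem.Set.add imp m) with hX
        have hXext : ∃ t, X = PySem.Set.add imp m ++ t :=
          pvFoldl_ext _ (fun acc p => pvCollectA_ext rev g acc p) ps (PySem.Set.add imp m)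
        have hXfree : pvFree U X ≤ n - 1 := by
          obtain ⟨t, ht⟩ := hXext
          rw [ht]; exact le_trans (pvFree_append_le U _ t) hstart
        have hfold : xs'.foldl (fun a p => pvCollectA rev g a p) X
            = xs'.foldl (fun a p => pvCollectA rev (g+1) a p) X :=
          pvFoldA_irrel rev U HU xs' (n-1) g (g+1) X
            (fun q hq => hxs q (List.mem_cons_of_mem _ hq)) hXfree (by omega) (by omega)
        rw [hfold]
        obtain ⟨t2, ht2⟩ := pvFoldl_ext (fun a p => pvCollectA rev (g+1) a p)
          (fun acc p => pvCollectA_ext rev (g+1) acc p) xs' X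
        have hYfree : pvFree U (xs'.foldl (fun a p => pvCollectA rev (g+1) a p) X) ≤ n - 1 := by
          rw [ht2]; exact le_trans (pvFree_append_le U X t2) hXfree
        exact pvLoopB_irrel (fun m => PySem.Dict.getD rev m PySem.Set.empty) U HU (n-1) g (g+1) ys _ hys hYfree (by omega) (by omega)

theorem pvLoopB_nil (pi : String → List String) (f : Nat) (imp : PySem.Set String) :
    pvLoopB pi f [] imp = imp := by
  simp [pvLoopB]

-- ---- characterisation of A's reverse map: its entry at m is exactly pvParents of the items ----

theorem pvAdd_idem (s : PySem.Set String) (x : String) :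
    PySem.Set.add (PySem.Set.add s x) x = PySem.Set.add s x := by
  by_cases h : x ∈ s <;> simp [PySem.Set.add, h]

-- the inner loop over one item's targets adds the source to each target's entry (once)
theorem pvInner_getD (src : String) :
    ∀ (dests : List String) (d : PySem.Dict String (PySem.Set String)) (m : String),
      PySem.Dict.getD (dests.foldl (fun d dest => PySem.Dict.modify d dest PySem.Set.empty (fun s => PySem.Set.add s src)) d) m PySem.Set.empty
        = if dests.contains m then PySem.Set.add (PySem.Dict.getD d m PySem.Set.empty) src
          else PySem.Dict.getD d m PySem.Set.empty := by
  intro dests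
  induction dests with
  | nil => intro d m; simp
  | cons dest rest ih =>
    intro d m
    rw [List.foldl_cons, ih]
    by_cases hdm : m = dest
    · subst hdm
      have h1 : PySem.Dict.getD (PySem.Dict.modify d m PySem.Set.empty (fun s => PySem.Set.add s src)) m PySem.Set.empty
          = PySem.Set.add (PySem.Dict.getD d m PySem.Set.empty) src :=
        PySem.Dict.getD_modify_self d m PySem.Set.empty _
      by_cases hr : rest.contains m
      · rw [if_pos hr, h1]
        simp only [List.contains_cons, hr, Bool.or_true, if_true]
        exact pvAdd_idem _ _
      · rw [if_neg hr, h1]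
        simp
    · have h1 : PySem.Dict.getD (PySem.Dict.modify d dest PySem.Set.empty (fun s => PySem.Set.add s src)) m PySem.Set.empty
          = PySem.Dict.getD d m PySem.Set.empty := by
        rw [PySem.Dict.getD_modify, if_neg hdm]
      rw [h1]
      simp only [List.contains_cons]
      have : (m == dest) = false := by simp [hdm]
      rw [this, Bool.false_or]

-- the outer loop over the items appends each new source to the entries of its targets
theorem pvRevFold_getD :
    ∀ (L : List (String × List String)) (d : PySem.Dict String (PySem.Set String)) (m : String),
      (L.map Prod.fst).Nodup →
      (∀ k x, x ∈ PySem.Dict.getD d k PySem.Set.empty → x ∉ L.map Prod.fst) →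
      PySem.Dict.getD
        (L.foldl (fun d p => p.2.foldl (fun d dest => PySem.Dict.modify d dest PySem.Set.empty (fun s => PySem.Set.add s p.1)) d) d)
        m PySem.Set.empty
        = PySem.Dict.getD d m PySem.Set.empty ++ pvParents L m := by
  intro L
  induction L with
  | nil => intro d m _ _; simp [pvParents]
  | cons p L' ih =>
    intro d m hnd hdisj
    rw [List.foldl_cons]
    have hstep : ∀ k, PySem.Dict.getD (p.2.foldl (fun d dest => PySem.Dict.modify d dest PySem.Set.empty (fun s => PySem.Set.add s p.1)) d) k PySem.Set.empty
        = PySem.Dict.getD d k PySem.Set.empty ++ (if p.2.contains k then [p.1] else []) := by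
      intro k
      rw [pvInner_getD]
      by_cases hk : p.2.contains k
      · rw [if_pos hk, if_pos hk, pvAdd_eq_append]
        intro hmem
        exact hdisj k p.1 hmem (by simp)
      · rw [if_neg hk, if_neg hk, List.append_nil]
    have hnd2 : (p.1 :: L'.map Prod.fst).Nodup := by simpa using hnd
    have hnd' : (L'.map Prod.fst).Nodup := (List.nodup_cons.1 hnd2).2
    have hhead : p.1 ∉ L'.map Prod.fst := (List.nodup_cons.1 hnd2).1
    have hdisj' : ∀ k x, x ∈ PySem.Dict.getD (p.2.foldl (fun d dest => PySem.Dict.modify d dest PySem.Set.empty (fun s => PySem.Set.add s p.1)) d) k PySem.Set.empty → x ∉ L'.map Prod.fst := by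
      intro k x hx
      rw [hstep k] at hx
      rcases List.mem_append.1 hx with hx' | hx'
      · exact fun hmem => hdisj k x hx' (List.mem_cons_of_mem _ hmem)
      · have : x = p.1 := by
          split_ifs at hx' with hp
          · simpa using hx'
          · simp at hx'
        subst this; exact hhead
    rw [ih _ m hnd' hdisj', hstep m]
    have hparents : pvParents (p :: L') m = (if p.2.contains m then [p.1] else []) ++ pvParents L' m := by
      by_cases hp : m ∈ p.2
      · simp [pvParents, hp]
      · simp [pvParents, hp]
    rw [hparents, List.append_assoc]

-- the {node: set() for node in graph} initialisation has only empty entries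
theorem pvInit_getD (ks : List String) (m : String) :
    PySem.Dict.getD (ks.foldl (fun d node => PySem.Dict.insert d node PySem.Set.empty) ((PySem.Dict.mk []) : PySem.Dict String (PySem.Set String))) m PySem.Set.empty = ([] : List String) := by
  have gen : ∀ (ks : List String) (d : PySem.Dict String (PySem.Set String)),
      (∀ k, PySem.Dict.getD d k PySem.Set.empty = ([] : List String)) →
      ∀ m, PySem.Dict.getD (ks.foldl (fun d node => PySem.Dict.insert d node PySem.Set.empty) d) m PySem.Set.empty = ([] : List String) := by
    intro ks
    induction ks with
    | nil => intro d h m; exact h m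
    | cons k ks ih =>
      intro d h m
      rw [List.foldl_cons]
      refine ih _ (fun k' => ?_) m
      rw [PySem.Dict.getD_insert]
      by_cases hk : k' = k
      · simp [hk, PySem.Set.empty]
      · rw [if_neg hk]; exact h k'
  exact gen ks _ (fun k => rfl) m

-- A's reverse map entry at m = the sources whose target lists contain m, in items order
theorem pvRev_eq_parents (dep : List (String × List (String × List String))) (m : String) :
    PySem.Dict.getD (pvReverse dep) m PySem.Set.empty
      = pvParents (PySem.Dict.items (((PySem.Dict.mk dep).getD "graph" []).foldl (fun d p => PySem.Dict.insert d p.1 p.2) (PySem.Dict.mk []))) m := by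
  unfold pvReverse
  set graph := ((PySem.Dict.mk dep).getD "graph" []).foldl (fun d p => PySem.Dict.insert d p.1 p.2) (PySem.Dict.mk []) with hgraph
  have hnd : (PySem.Dict.keys graph).Nodup := by
    rw [hgraph]
    exact PySem.Dict.nodup_keys_foldl_insert_key _ Prod.fst _ _ PySem.Dict.nodup_keys_empty
  have hndi : ((PySem.Dict.items graph).map Prod.fst).Nodup := by
    simpa [PySem.Dict.keys] using hnd
  rw [pvRevFold_getD (PySem.Dict.items graph) _ m hndi
    (fun k x hx => by rw [pvInit_getD] at hx; simp at hx)]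
  rw [pvInit_getD]
  rfl

theorem pvParents_sub (L : List (String × List String)) (m p : String)
    (h : p ∈ pvParents L m) : p ∈ L.map Prod.fst := by
  unfold pvParents at h
  obtain ⟨q, hq, rfl⟩ := List.mem_map.1 h
  exact List.mem_map.2 ⟨q, List.mem_of_mem_filter hq, rfl⟩

theorem pvGetD_mem_values (d : PySem.Dict String (PySem.Set String)) (k : String) :
    PySem.Dict.getD d k PySem.Set.empty = PySem.Set.empty
      ∨ PySem.Dict.getD d k PySem.Set.empty ∈ PySem.Dict.values d := by
  obtain ⟨items⟩ := d
  induction items with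
  | nil => left; rfl
  | cons p rest ih =>
    obtain ⟨k', v⟩ := p
    rw [PySem.Dict.getD_eq_get?_getD, PySem.Dict.get?_mk_cons]
    by_cases h : k' == k
    · rw [if_pos h]
      right
      simp [PySem.Dict.values]
    · rw [if_neg h, ← PySem.Dict.getD_eq_get?_getD]
      rcases ih with h' | h'
      · left; exact h'
      · right; simp [PySem.Dict.values] at h' ⊢; right; exact h'

-- ===== VERDICT (by name: the statement is the Claim_ definition above) =====
theorem determine_tests_for_changed_modules_spec : Claim_equal_determine_tests_for_changed_modules := by
  intro changed mtt dep _
  unfold Spec_determine_tests_for_changed_modules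
  unfold determine_tests_for_changed_modules determine_tests_for_changed_modules_alt
  simp only []
  set rev := pvReverse dep with hrev
  set mttd := PySem.Dict.mk mtt with hmttd
  set gitems := PySem.Dict.items (((PySem.Dict.mk dep).getD "graph" []).foldl (fun d p => PySem.Dict.insert d p.1 p.2) PySem.Dict.empty) with hgitems
  -- PySem.Dict.empty and PySem.Dict.mk [] build the same dict
  have hchar : ∀ m, PySem.Dict.getD rev m PySem.Set.empty = pvParents gitems m := by
    intro m; exact pvRev_eq_parents dep m
  have hpi : pvParents gitems = (fun m => PySem.Dict.getD rev m PySem.Set.empty) := by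
    funext m; rw [hchar m]
  set seeds := changed.filter (fun c => PySem.Dict.contains mttd c) with hseeds
  have hseeds_sub : ∀ x ∈ seeds, x ∈ changed := fun x hx => List.mem_of_mem_filter hx
  -- universes and fuels
  set UA : List String := changed ++ (PySem.Dict.values rev).flatten with hUA
  set UB : List String := changed ++ gitems.map Prod.fst with hUB
  have HUA : ∀ m p, p ∈ PySem.Dict.getD rev m PySem.Set.empty → p ∈ UA := by
    intro m p hp
    rcases pvGetD_mem_values rev m with h | h
    · rw [h] at hp; simp [PySem.Set.empty] at hp
    · exact List.mem_append_right _ (List.mem_flatten.2 ⟨_, h, hp⟩)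
  have HUB : ∀ m p, p ∈ PySem.Dict.getD rev m PySem.Set.empty → p ∈ UB := by
    intro m p hp
    rw [hchar m] at hp
    exact List.mem_append_right _ (pvParents_sub gitems m p hp)
  set fuelA := pvFuel changed rev with hfuelA
  set fuelB := changed.length + gitems.length + 1 with hfuelB
  set bigF := max fuelA fuelB with hbigF
  have hUAlen : UA.length + 1 = fuelA := by simp [hfuelA, pvFuel, hUA]
  have hUBlen : UB.length + 1 = fuelB := by simp [hfuelB, hUB]
  have hfreeA : pvFree UA PySem.Set.empty ≤ UA.length := by
    simpa [pvFree] using List.length_filter_le _ UA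
  have hfreeB : pvFree UB PySem.Set.empty ≤ UB.length := by
    simpa [pvFree] using List.length_filter_le _ UB
  -- A's guarded fold = fold over the filtered seeds
  have hfold : changed.foldl
      (fun imp c => if PySem.Dict.contains mttd c then pvCollectA rev fuelA imp c else imp)
      PySem.Set.empty
      = seeds.foldl (fun imp c => pvCollectA rev fuelA imp c) PySem.Set.empty :=
    PySem.List.foldl_if_eq_foldl_filter _ _ _ _
  rw [hfold, hpi]
  -- B's loop at its own fuel = B's loop at bigF
  have hirr : pvLoopB (fun m => PySem.Dict.getD rev m PySem.Set.empty) fuelB seeds PySem.Set.empty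
      = pvLoopB (fun m => PySem.Dict.getD rev m PySem.Set.empty) bigF seeds PySem.Set.empty :=
    pvLoopB_irrel _ UB HUB UB.length fuelB bigF seeds PySem.Set.empty
      (fun x hx => List.mem_append_left _ (hseeds_sub x hx)) hfreeB (by omega)
      (le_trans (by omega) (le_max_right fuelA fuelB))
  -- bridge at bigF, then lower A's fold to fuelA
  have hbridge := pvBridge rev UB HUB UB.length bigF seeds [] PySem.Set.empty
    (fun x hx => List.mem_append_left _ (hseeds_sub x hx)) (by intro y hy; simp at hy)
    hfreeB (le_trans (by omega) (le_max_right fuelA fuelB))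
  rw [List.append_nil, pvLoopB_nil] at hbridge
  have hlowerA : seeds.foldl (fun acc c => pvCollectA rev bigF acc c) PySem.Set.empty
      = seeds.foldl (fun acc c => pvCollectA rev fuelA acc c) PySem.Set.empty :=
    pvFoldA_irrel rev UA HUA seeds UA.length bigF fuelA PySem.Set.empty
      (fun x hx => List.mem_append_left _ (hseeds_sub x hx)) hfreeA
      (le_trans (by omega) (le_max_left fuelA fuelB)) (by omega)
  rw [hirr, hbridge, hlowerA]
  -- the final union loops coincide (Set.update IS foldl add)
  simp [PySem.Set.update]
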